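-- pv_equiv track=rewrite | github.com/mavren-26/Chris-code-54 | 29.py | permuteWithBlocked
-- ===== SOURCE A (Python) =====
-- def permuteWithBlocked(nums, blocked):
--     res = []
--     n = len(nums)
--     fixed = nums[:]
--     free = [nums[i] for i in range(n) if not blocked[i]]
--     free.sort()
--     used = [False] * len(free)
--
--     def backtrack(path):
--         if len(path) == len(free):
--             idx = 0
--             perm = fixed[:]
--             for i in range(n):
--                 if not blocked[i]:
--                     perm[i] = path[idx]
--                     idx += 1
--             res.append(perm)
--             return
--
--         for i in range(len(free)):
--             if used[i]: continue
--             if i > 0 and free[i] == free[i-1] and not used[i-1]: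
--                 continue
--             used[i] = True
--             backtrack(path + [free[i]])
--             used[i] = False
--
--     backtrack([])
--     return res
-- ===== SOURCE B (Python) =====
-- def permuteWithBlocked(nums, blocked):
--     free = sorted(v for v, b in zip(nums, blocked) if not b)
--
--     def perms(rem):
--         if not rem:
--             return [[]]
--         out = []
--         for v in sorted(set(rem)):
--             rest = rem.copy()
--             rest.remove(v)
--             for tail in perms(rest):
--                 out.append([v] + tail)
--         return out
--
--     res = []
--     for p in perms(free):
--         it = iter(p)
--         res.append([x if b else next(it) for x, b in zip(nums, blocked)])
--     return res
-- ===== Notes on version B (the rewrite author's own statement) =====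
-- stated objective: alternative
-- what changed: Replaces A's index-based backtracker (fixed sorted free array, used[] flags, the free[i]==free[i-1]-and-not-used[i-1] duplicate skip, filling a copy of nums by index) with a value recursion on the shrinking multiset of free values (iterate over sorted(set(rem)), remove one occurrence, recurse) and an iterator/zip comprehension that fills the non-blocked slots.
import Mathlib
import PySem

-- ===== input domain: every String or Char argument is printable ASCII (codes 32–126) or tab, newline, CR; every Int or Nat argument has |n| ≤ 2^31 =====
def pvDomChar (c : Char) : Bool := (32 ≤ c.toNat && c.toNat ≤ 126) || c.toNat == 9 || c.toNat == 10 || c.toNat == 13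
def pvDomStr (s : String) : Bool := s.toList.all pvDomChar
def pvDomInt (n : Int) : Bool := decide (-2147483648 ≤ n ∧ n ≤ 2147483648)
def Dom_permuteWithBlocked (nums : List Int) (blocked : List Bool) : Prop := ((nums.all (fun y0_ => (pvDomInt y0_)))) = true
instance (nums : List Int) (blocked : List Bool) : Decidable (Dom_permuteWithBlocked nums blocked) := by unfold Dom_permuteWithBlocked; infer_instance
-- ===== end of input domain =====

-- B replaces A's used-array duplicate-skipping backtracker by a value recursion on the shrinking
-- multiset of free values (iterate sorted(set(rem)), remove one occurrence, recurse), and fills the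
-- non-blocked slots by consuming the permutation with an iterator over zip(nums, blocked);
-- objective: alternative (same asymptotic cost, no index/used-flag state).

-- ===== PORT A =====
-- the fill loop of backtrack's leaf: perm = fixed[:]; idx = 0; for i in range(n): if not blocked[i]: perm[i] = path[idx]; idx += 1
-- blocked[i] is in range under Pre_ (n ≤ len(blocked)); path[idx] is in range whenever A reaches this point, so getD's defaults are never used.
def pvFillA (blocked : List Bool) (path : List Int) (n : Nat) (fixed : List Int) : List Int :=
  ((List.range n).foldl
    (fun (st : List Int × Nat) i =>
      if !(blocked.getD i false) then (st.1.set i (path.getD st.2 0), st.2 + 1) else st)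
    (fixed, 0)).1

-- backtrack(path) with the mutable `used` threaded as a parameter (Python restores used[i] after each
-- recursive call, so each call leaves `used` unchanged); fuel = free.length - path.length makes the
-- recursion structural and is exact on every reachable state.
def pvBacktrackA (free fixed : List Int) (blocked : List Bool) (n : Nat) :
    Nat → List Bool → List Int → List (List Int)
  | fuel, used, path =>
    if path.length = free.length then
      [pvFillA blocked path n fixed]
    else
      match fuel with
      | 0 => []  -- unreachable: fuel ≥ free.length - path.length on every reachable state
      | fuel + 1 =>
        (List.range free.length).foldl
          (fun acc i =>
            if used.getD i false then acc
            else if 0 < i ∧ free.getD i 0 = free.getD (i - 1) 0 ∧ used.getD (i - 1) false = false then acc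
            else acc ++ pvBacktrackA free fixed blocked n fuel (used.set i true) (path ++ [free.getD i 0]))
          []

def permuteWithBlocked (nums : List Int) (blocked : List Bool) : List (List Int) :=
  let n := nums.length
  let fixed := nums
  -- free = [nums[i] for i in range(n) if not blocked[i]]; free.sort()
  let free := PySem.List.sorted
    ((List.range n).filterMap (fun i => if blocked.getD i false then none else some (nums.getD i 0)))
    (fun x => x) false
  pvBacktrackA free fixed blocked n free.length (List.replicate free.length false) []

-- ===== PORT B =====
-- perms(rem): if not rem: return [[]]; for v in sorted(set(rem)): rest = rem.copy(); rest.remove(v); out.extend([v]+t for t in perms(rest))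
-- fuel = rem.length makes the recursion structural; rest.remove(v) never raises (v ∈ rem), so getD's default is never used.
def pvPermsB : Nat → List Int → List (List Int)
  | _, [] => [[]]
  | 0, _ :: _ => []  -- unreachable: fuel ≥ rem.length on every reachable state
  | fuel + 1, rem =>
    (PySem.List.sorted (PySem.Set.ofList rem) (fun x => x) false).foldl
      (fun out v => out ++ (pvPermsB fuel ((PySem.List.remove? rem v).getD rem)).map (fun t => v :: t))
      []

-- [x if b else next(it) for x, b in zip(nums, blocked)], it = iter(p)
-- next(it) never raises on reachable inputs (p has exactly one value per non-blocked slot), so the [] arm is never used.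
def pvFillB : List (Int × Bool) → List Int → List Int
  | [], _ => []
  | (x, b) :: rest, p =>
    if b then x :: pvFillB rest p
    else
      match p with
      | y :: ys => y :: pvFillB rest ys
      | [] => []

def permuteWithBlocked_alt (nums : List Int) (blocked : List Bool) : List (List Int) :=
  let free := PySem.List.sorted
    ((nums.zip blocked).filterMap (fun vb => if vb.2 then none else some vb.1))
    (fun x => x) false
  (pvPermsB free.length free).map (fun p => pvFillB (nums.zip blocked) p)

-- ===== PRECONDITION & SPEC =====
-- Pre_ excludes exactly the inputs where A raises IndexError: blocked shorter than nums
-- (A reads blocked[i] for every i < len(nums)).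
def Pre_permuteWithBlocked (nums : List Int) (blocked : List Bool) : Prop :=
  nums.length ≤ blocked.length
instance (nums : List Int) (blocked : List Bool) : Decidable (Pre_permuteWithBlocked nums blocked) := by
  unfold Pre_permuteWithBlocked; infer_instance

def pvWitness_permuteWithBlocked : List Int × List Bool := ([1, 1, 2], [false, false, true])

def Spec_permuteWithBlocked (nums : List Int) (blocked : List Bool) (out : List (List Int)) : Prop := out = permuteWithBlocked_alt nums blocked
instance (nums : List Int) (blocked : List Bool) (out : List (List Int)) : Decidable (Spec_permuteWithBlocked nums blocked out) := by unfold Spec_permuteWithBlocked; infer_instance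

-- ===== CLAIM (what is proved, stated in full; the proofs are below) =====
def Claim_equal_permuteWithBlocked : Prop := ∀ (nums : List Int) (blocked : List Bool), Dom_permuteWithBlocked nums blocked → Pre_permuteWithBlocked nums blocked → Spec_permuteWithBlocked nums blocked (permuteWithBlocked nums blocked)

-- ===== LEMMAS AND PROOFS =====

-- the multiset of still-unused free values, in position order
def pvRem (free : List Int) (used : List Bool) : List Int :=
  (free.zip used).filterMap (fun p => if p.2 then none else some p.1)

-- invariant of A's search: inside a block of equal free values, the used indices form a prefix
def pvInv (free : List Int) (used : List Bool) : Prop :=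
  ∀ i, i + 1 < free.length → free.getD i 0 = free.getD (i + 1) 0 →
    used.getD (i + 1) false = true → used.getD i false = true

-- index of the first unused occurrence of v
def pvFi (free : List Int) (used : List Bool) (v : Int) : Nat :=
  (free.zip used).findIdx (fun p => !p.2 && (p.1 == v))

theorem pvRem_replicate (free : List Int) : pvRem free (List.replicate free.length false) = free := by
  induction free with
  | nil => simp [pvRem]
  | cons x xs ih => simpa [pvRem, List.replicate_succ] using ih

theorem foldl_skip2 {β γ : Type} (P Q : β → Prop) [DecidablePred P] [DecidablePred Q]
    (F : β → List γ) (l : List β) (acc : List γ) :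
    l.foldl (fun a x => if P x then a else if Q x then a else a ++ F x) acc
      = acc ++ (l.filter (fun x => decide (¬ P x ∧ ¬ Q x))).flatMap F := by
  induction l generalizing acc with
  | nil => simp
  | cons x xs ih =>
    by_cases hP : P x <;> by_cases hQ : Q x <;> simp [hP, hQ, ih]

theorem mem_pvRem (free : List Int) (used : List Bool) (hlen : used.length = free.length) (x : Int) :
    x ∈ pvRem free used ↔ ∃ i, ∃ h : i < free.length,
      used.getD i false = false ∧ free.getD i 0 = x := by
  simp only [pvRem, List.mem_filterMap]
  constructor
  · rintro ⟨⟨a, b⟩, hab, hf⟩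
    rcases List.mem_iff_getElem.mp hab with ⟨i, hi, hEq⟩
    have hif : i < free.length := by simp [List.length_zip, hlen] at hi; omega
    have hiu : i < used.length := by omega
    have hz : (free[i], used[i]) = (a, b) := by rw [← List.getElem_zip]; exact hEq
    by_cases hb : b
    · simp [hb] at hf
    · simp [hb] at hf
      refine ⟨i, hif, ?_, ?_⟩
      · rw [List.getD_eq_getElem _ _ hiu]
        have := congrArg Prod.snd hz
        simp at this; simp [this]
        simpa using hb
      · rw [List.getD_eq_getElem _ _ hif]
        have := congrArg Prod.fst hz
        simp at this; simp [this, hf]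
  · rintro ⟨i, hif, hu, hv⟩
    have hiu : i < used.length := by omega
    refine ⟨(free[i], used[i]), ?_, ?_⟩
    · have : (free.zip used)[i]'(by simp [List.length_zip]; omega) = (free[i], used[i]) :=
        List.getElem_zip
      rw [← this]; exact List.getElem_mem _
    · rw [List.getD_eq_getElem _ _ hiu] at hu
      rw [List.getD_eq_getElem _ _ hif] at hv
      simp [hu, hv]

theorem eq_of_pairwise_lt_of_mem_iff {l₁ l₂ : List Nat}
    (h₁ : l₁.Pairwise (· < ·)) (h₂ : l₂.Pairwise (· < ·)) (hm : ∀ x, x ∈ l₁ ↔ x ∈ l₂) : l₁ = l₂ := by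
  induction l₁ generalizing l₂ with
  | nil =>
    cases l₂ with
    | nil => rfl
    | cons b t₂ => exact absurd ((hm b).mpr (by simp)) (by simp)
  | cons a t₁ ih =>
    cases l₂ with
    | nil => exact absurd ((hm a).mp (by simp)) (by simp)
    | cons b t₂ =>
      rcases List.pairwise_cons.mp h₁ with ⟨ha, hp₁⟩
      rcases List.pairwise_cons.mp h₂ with ⟨hb, hp₂⟩
      have hab : a = b := by
        have h1 := (hm a).mp (by simp)
        have h2 := (hm b).mpr (by simp)
        simp at h1 h2
        rcases h1 with h1 | h1
        · exact h1
        · rcases h2 with h2 | h2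
          · omega
          · have := hb a h1; have := ha b h2; omega
      subst hab
      have hmt : ∀ x, x ∈ t₁ ↔ x ∈ t₂ := by
        intro x
        constructor
        · intro hx
          have := (hm x).mp (by simp [hx])
          rcases List.mem_cons.mp this with h | h
          · exact absurd h (by have := ha x hx; omega)
          · exact h
        · intro hx
          have := (hm x).mpr (by simp [hx])
          rcases List.mem_cons.mp this with h | h
          · exact absurd h (by have := hb x hx; omega)
          · exact h
      rw [ih hp₁ hp₂ hmt]

theorem pvMono (free : List Int) (hs : free.Pairwise (· ≤ ·)) :
    ∀ i j, i ≤ j → j < free.length → free.getD i 0 ≤ free.getD j 0 := by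
  intro i j hij hj
  rcases Nat.eq_or_lt_of_le hij with rfl | h
  · exact le_refl _
  · rw [List.getD_eq_getElem _ _ (by omega), List.getD_eq_getElem _ _ hj]
    exact List.pairwise_iff_getElem.mp hs i j (by omega) hj h

theorem chain_used (free : List Int) (used : List Bool) (hlen : used.length = free.length)
    (hinv : pvInv free used) :
    ∀ d j m, m - j = d → j ≤ m → m < free.length →
    (∀ k, j ≤ k → k ≤ m → free.getD k 0 = free.getD m 0) →
    used.getD m false = true → used.getD j false = true := by
  intro d
  induction d with
  | zero =>
    intro j m hd hjm _ _ hm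
    have : j = m := by omega
    rw [this]; exact hm
  | succ d ih =>
    intro j m hd hjm hmlen heq hm
    have hlt : j < m := by omega
    have hj1 : used.getD (j + 1) false = true :=
      ih (j + 1) m (by omega) (by omega) hmlen (fun k hk1 hk2 => heq k (by omega) hk2) hm
    exact hinv j (by omega)
      (by rw [heq j (le_refl _) (by omega), heq (j + 1) (by omega) (by omega)]) hj1

theorem pvFi_spec (free : List Int) (used : List Bool) (hlen : used.length = free.length)
    (v : Int) (hv : v ∈ pvRem free used) :
    pvFi free used v < free.length ∧
    used.getD (pvFi free used v) false = false ∧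
    free.getD (pvFi free used v) 0 = v ∧
    (∀ j < pvFi free used v, j < free.length →
      ¬ (used.getD j false = false ∧ free.getD j 0 = v)) := by
  obtain ⟨i, hi, hu, hx⟩ := (mem_pvRem free used hlen v).mp hv
  have hiu : i < used.length := by omega
  have hzlen : (free.zip used).length = free.length := by simp [hlen]
  rw [List.getD_eq_getElem _ _ hiu] at hu
  rw [List.getD_eq_getElem _ _ hi] at hx
  have hex : ∃ a ∈ free.zip used, (!a.2 && (a.1 == v)) = true := by
    refine ⟨(free[i], used[i]), ?_, by simp [hu, hx]⟩
    exact List.mem_iff_getElem.mpr ⟨i, by omega, List.getElem_zip⟩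
  have hlt : (free.zip used).findIdx (fun p => !p.2 && (p.1 == v)) < (free.zip used).length :=
    List.findIdx_lt_length_of_exists hex
  have hfieq : pvFi free used v = (free.zip used).findIdx (fun p => !p.2 && (p.1 == v)) := rfl
  have hfif : pvFi free used v < free.length := by rw [hfieq]; omega
  have hfiu : pvFi free used v < used.length := by omega
  have hpred := List.findIdx_getElem (w := hlt)
  rw [List.getElem_zip] at hpred
  simp only [Bool.and_eq_true, Bool.not_eq_true', beq_iff_eq] at hpred
  simp only [← hfieq] at hpred
  refine ⟨hfif, ?_, ?_, ?_⟩
  · rw [List.getD_eq_getElem _ _ hfiu]; exact hpred.1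
  · rw [List.getD_eq_getElem _ _ hfif]; exact hpred.2
  · intro j hj hjf hc
    have hju : j < used.length := by omega
    rw [hfieq] at hj
    have hnp : ((fun (p : Int × Bool) => !p.2 && (p.1 == v))
        ((free.zip used)[j]'(by omega))) = false := List.not_of_lt_findIdx hj
    rw [List.getElem_zip] at hnp
    simp only [Bool.and_eq_false_iff, Bool.not_eq_false', beq_eq_false_iff_ne] at hnp
    rw [List.getD_eq_getElem _ _ hju] at hc
    rw [List.getD_eq_getElem _ _ hjf] at hc
    rcases hnp with h | h
    · rw [hc.1] at h; simp at h
    · exact h hc.2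

theorem pvRem_set_fi (free : List Int) (used : List Bool) (hlen : used.length = free.length)
    (v : Int) (hv : v ∈ pvRem free used) :
    pvRem free (used.set (pvFi free used v) true) = (pvRem free used).erase v := by
  obtain ⟨hfif, hfu, hfv, hmin⟩ := pvFi_spec free used hlen v hv
  set i := pvFi free used v with hidef
  have hiu : i < used.length := by omega
  rw [List.getD_eq_getElem _ _ hiu] at hfu
  rw [List.getD_eq_getElem _ _ hfif] at hfv
  have hl1 : (free.take i).length = i := by simp; omega
  have hu1 : (used.take i).length = i := by simp; omega
  have hfree : free = free.take i ++ free[i] :: free.drop (i + 1) := by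
    conv_lhs => rw [← List.take_append_drop i free, List.drop_eq_getElem_cons hfif]
  have hused : used = used.take i ++ used[i] :: used.drop (i + 1) := by
    conv_lhs => rw [← List.take_append_drop i used, List.drop_eq_getElem_cons hiu]
  have hset : used.set i true = used.take i ++ true :: used.drop (i + 1) := by
    have hgen : ∀ (u1 : List Bool) (c : Bool) (u2 : List Bool),
        (u1 ++ c :: u2).set u1.length true = u1 ++ true :: u2 := by
      intro u1 c u2; rw [List.set_append_right] <;> simp
    have h := hgen (used.take i) used[i] (used.drop (i + 1))
    rw [hu1] at h
    conv_lhs => rw [hused]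
    exact h
  have hz1 : free.zip used
      = (free.take i).zip (used.take i) ++ (v, false) :: (free.drop (i + 1)).zip (used.drop (i + 1)) := by
    conv_lhs => rw [hfree, hused]
    rw [List.zip_append (by rw [hl1, hu1]), List.zip_cons_cons, hfv, hfu]
  have hz2 : free.zip (used.set i true)
      = (free.take i).zip (used.take i) ++ (v, true) :: (free.drop (i + 1)).zip (used.drop (i + 1)) := by
    conv_lhs => rw [hfree, hset]
    rw [List.zip_append (by rw [hl1, hu1]), List.zip_cons_cons, hfv]
  have hnotmem : v ∉ pvRem (free.take i) (used.take i) := by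
    intro hmem
    obtain ⟨j, hj, hju, hjv⟩ := (mem_pvRem _ _ (by rw [hl1, hu1]) v).mp hmem
    rw [hl1] at hj
    have hjf : j < free.length := by omega
    refine hmin j (by omega) hjf ⟨?_, ?_⟩
    · rw [List.getD_eq_getElem _ _ (by omega : j < used.length)]
      rw [List.getD_eq_getElem _ _ (by rw [hu1]; omega)] at hju
      simpa [List.getElem_take] using hju
    · rw [List.getD_eq_getElem _ _ hjf]
      rw [List.getD_eq_getElem _ _ (by rw [hl1]; omega)] at hjv
      simpa [List.getElem_take] using hjv
  unfold pvRem
  rw [hz1, hz2, List.filterMap_append, List.filterMap_append]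
  simp only [List.filterMap_cons]
  norm_num
  rw [List.erase_append_right _ (by simpa [pvRem] using hnotmem), List.erase_cons_head]

theorem pvInv_set_fi (free : List Int) (used : List Bool)
    (hlen : used.length = free.length) (hinv : pvInv free used)
    (v : Int) (hv : v ∈ pvRem free used) :
    pvInv free (used.set (pvFi free used v) true) := by
  obtain ⟨hfif, hfu, hfv, hmin⟩ := pvFi_spec free used hlen v hv
  set i := pvFi free used v with hidef
  have hiu : i < used.length := by omega
  intro k hk1 hkeq hk2
  have hk1u : k < used.length := by omega
  have hku1 : k + 1 < used.length := by omega
  by_cases hki : k = i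
  · subst hki
    rw [List.getD_eq_getElem _ _ (by simpa using hk1u)]
    simp [List.getElem_set_self]
  · have hgk : (used.set i true).getD k false = used.getD k false := by
      rw [List.getD_eq_getElem _ _ (by simpa using hk1u), List.getD_eq_getElem _ _ hk1u]
      exact List.getElem_set_ne (by omega) _
    by_cases hk1i : k + 1 = i
    · have hfk : free.getD k 0 = v := by
        rw [hkeq, hk1i]; exact hfv
      have hm := hmin k (by omega) (by omega)
      rw [hgk]
      by_cases hu : used.getD k false = true
      · exact hu
      · exact absurd ⟨by simpa using hu, hfk⟩ hm
    · have hgk1 : (used.set i true).getD (k + 1) false = used.getD (k + 1) false := by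
        rw [List.getD_eq_getElem _ _ (by simpa using hku1), List.getD_eq_getElem _ _ hku1]
        exact List.getElem_set_ne (by omega) _
      rw [hgk]
      exact hinv k hk1 hkeq (by rw [← hgk1]; exact hk2)

-- A's non-skipped indices are exactly the first unused occurrences of the distinct remaining values
theorem filter_allowed_eq (free : List Int) (used : List Bool)
    (hs : free.Pairwise (· ≤ ·)) (hlen : used.length = free.length) (hinv : pvInv free used) :
    (List.range free.length).filter
        (fun i => decide (¬ (used.getD i false = true) ∧
          ¬ (0 < i ∧ free.getD i 0 = free.getD (i - 1) 0 ∧ used.getD (i - 1) false = false)))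
      = (PySem.List.sorted (PySem.Set.ofList (pvRem free used)) (fun x => x) false).map
          (pvFi free used) := by
  -- there is no unused occurrence of free[x] strictly before an allowed index x
  have hnone : ∀ x < free.length,
      (¬ (used.getD x false = true) ∧
        ¬ (0 < x ∧ free.getD x 0 = free.getD (x - 1) 0 ∧ used.getD (x - 1) false = false)) →
      ∀ j < x, ¬ (used.getD j false = false ∧ free.getD j 0 = free.getD x 0) := by
    intro x hxlen hq j hj hc
    have hx0 : 0 < x := by omega
    have h1 : free.getD j 0 ≤ free.getD (x - 1) 0 := pvMono free hs j (x - 1) (by omega) (by omega)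
    have h2 : free.getD (x - 1) 0 ≤ free.getD x 0 := pvMono free hs (x - 1) x (by omega) hxlen
    have hfx1 : free.getD (x - 1) 0 = free.getD x 0 := by rw [hc.2] at h1; omega
    have hux1 : used.getD (x - 1) false = true := by
      by_cases h : used.getD (x - 1) false = true
      · exact h
      · exact absurd ⟨hx0, hfx1.symm, by simpa using h⟩ hq.2
    have heqk : ∀ k, j ≤ k → k ≤ x - 1 → free.getD k 0 = free.getD (x - 1) 0 := by
      intro k hk1 hk2
      have ha : free.getD j 0 ≤ free.getD k 0 := pvMono free hs j k hk1 (by omega)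
      have hb : free.getD k 0 ≤ free.getD (x - 1) 0 := pvMono free hs k (x - 1) hk2 (by omega)
      rw [hc.2] at ha; omega
    have := chain_used free used hlen hinv (x - 1 - j) j (x - 1) rfl (by omega) (by omega)
      heqk hux1
    rw [hc.1] at this; simp at this
  apply eq_of_pairwise_lt_of_mem_iff
  · exact List.Pairwise.sublist List.filter_sublist List.pairwise_lt_range
  · rw [List.pairwise_map]
    refine List.Pairwise.imp_of_mem ?_
      (PySem.List.sorted_ofList_pairwise_lt (pvRem free used))
    intro a b ha hb hab
    have har : a ∈ pvRem free used :=
      (PySem.Set.mem_ofList _ _).mp ((PySem.List.mem_sorted _ _ _ _).mp ha)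
    have hbr : b ∈ pvRem free used :=
      (PySem.Set.mem_ofList _ _).mp ((PySem.List.mem_sorted _ _ _ _).mp hb)
    obtain ⟨hal, _, hav, _⟩ := pvFi_spec free used hlen a har
    obtain ⟨hbl, _, hbv, _⟩ := pvFi_spec free used hlen b hbr
    by_contra hcon
    have hle : pvFi free used b ≤ pvFi free used a := by omega
    have := pvMono free hs _ _ hle hal
    rw [hav, hbv] at this; omega
  · intro x
    simp only [List.mem_filter, List.mem_range, List.mem_map, decide_eq_true_eq]
    constructor
    · rintro ⟨hxlen, hq⟩
      have hvrem : free.getD x 0 ∈ pvRem free used :=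
        (mem_pvRem free used hlen _).mpr ⟨x, hxlen, by simpa using hq.1, rfl⟩
      obtain ⟨hfl, hfu, hfv, hmin⟩ := pvFi_spec free used hlen _ hvrem
      refine ⟨free.getD x 0,
        (PySem.List.mem_sorted _ _ _ _).mpr ((PySem.Set.mem_ofList _ _).mpr hvrem), ?_⟩
      rcases Nat.lt_trichotomy (pvFi free used (free.getD x 0)) x with h | h | h
      · exact absurd ⟨hfu, hfv⟩ (hnone x hxlen hq _ h)
      · exact h
      · exact absurd ⟨by simpa using hq.1, rfl⟩ (hmin x h hxlen)
    · rintro ⟨v, hvS, hfi⟩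
      have hvrem : v ∈ pvRem free used :=
        (PySem.Set.mem_ofList _ _).mp ((PySem.List.mem_sorted _ _ _ _).mp hvS)
      obtain ⟨hfl, hfu, hfv, hmin⟩ := pvFi_spec free used hlen v hvrem
      subst hfi
      refine ⟨hfl, by simpa using hfu, ?_⟩
      rintro ⟨hx0, hfeq, hu1⟩
      refine hmin (pvFi free used v - 1) (by omega) (by omega) ⟨hu1, ?_⟩
      rw [← hfeq, hfv]

-- main induction: A's backtracker computes B's value recursion, pointwise under the fill
theorem bt_eq (fuelA : Nat) (free fixed : List Int) (blocked : List Bool) (n : Nat) :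
    ∀ (used : List Bool) (path : List Int) (fuelB : Nat),
    free.Pairwise (· ≤ ·) →
    used.length = free.length →
    pvInv free used →
    path.length + (pvRem free used).length = free.length →
    (pvRem free used).length ≤ fuelA →
    (pvRem free used).length ≤ fuelB →
    pvBacktrackA free fixed blocked n fuelA used path
      = (pvPermsB fuelB (pvRem free used)).map (fun t => pvFillA blocked (path ++ t) n fixed) := by
  induction fuelA with
  | zero =>
    intro used path fuelB hs hlen hinv hsum hA hB
    have hrem : pvRem free used = [] := List.length_eq_zero_iff.mp (by omega)
    have hpath : path.length = free.length := by rw [hrem] at hsum; simpa using hsum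
    rw [pvBacktrackA, if_pos hpath, hrem,
      show pvPermsB fuelB [] = [[]] from by cases fuelB <;> rfl]
    simp
  | succ fa ih =>
    intro used path fuelB hs hlen hinv hsum hA hB
    by_cases hpath : path.length = free.length
    · have hrem : pvRem free used = [] := List.length_eq_zero_iff.mp (by omega)
      rw [pvBacktrackA, if_pos hpath, hrem,
        show pvPermsB fuelB [] = [[]] from by cases fuelB <;> rfl]
      simp
    · have hremlen : 0 < (pvRem free used).length := by omega
      obtain ⟨r, rs, hrem⟩ : ∃ r rs, pvRem free used = r :: rs := by
        cases h : pvRem free used with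
        | nil => rw [h] at hremlen; simp at hremlen
        | cons a b => exact ⟨a, b, rfl⟩
      obtain ⟨fb, rfl⟩ : ∃ fb, fuelB = fb + 1 := ⟨fuelB - 1, by omega⟩
      rw [pvBacktrackA, if_neg hpath]
      rw [foldl_skip2 (fun i => used.getD i false = true)
        (fun i => 0 < i ∧ free.getD i 0 = free.getD (i - 1) 0 ∧ used.getD (i - 1) false = false)
        (fun i => pvBacktrackA free fixed blocked n fa (used.set i true)
          (path ++ [free.getD i 0]))]
      rw [filter_allowed_eq free used hs hlen hinv]
      have hPB : pvPermsB (fb + 1) (pvRem free used)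
          = (PySem.List.sorted (PySem.Set.ofList (pvRem free used)) (fun x => x) false).foldl
              (fun out v => out ++
                (pvPermsB fb ((PySem.List.remove? (pvRem free used) v).getD
                  (pvRem free used))).map (fun t => v :: t)) [] := by
        rw [hrem]; rw [pvPermsB]; simp
      rw [hPB, PySem.List.foldl_append_eq_flatMap]
      simp only [List.nil_append]
      rw [List.flatMap_map, List.map_flatMap]
      apply List.flatMap_congr
      intro v hvS
      have hvrem : v ∈ pvRem free used :=
        (PySem.Set.mem_ofList _ _).mp ((PySem.List.mem_sorted _ _ _ _).mp hvS)
      obtain ⟨hfl, hfu, hfv, hmin⟩ := pvFi_spec free used hlen v hvrem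
      have hsetrem := pvRem_set_fi free used hlen v hvrem
      have herlen : ((pvRem free used).erase v).length = (pvRem free used).length - 1 :=
        List.length_erase_of_mem hvrem
      have hIH := ih (used.set (pvFi free used v) true) (path ++ [v]) fb hs
        (by simpa using hlen) (pvInv_set_fi free used hlen hinv v hvrem)
        (by rw [hsetrem]; simp [herlen]; omega)
        (by rw [hsetrem, herlen]; omega)
        (by rw [hsetrem, herlen]; omega)
      rw [hfv, hIH, hsetrem]
      rw [PySem.List.remove?_eq_some_erase _ v hvrem, Option.getD_some, List.map_map]
      apply List.map_congr_left
      intro t _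
      simp [List.append_assoc]

-- every permutation produced by B has exactly one value per free slot
theorem pvPermsB_length (fuel : Nat) : ∀ (rem : List Int), rem.length ≤ fuel →
    ∀ t ∈ pvPermsB fuel rem, t.length = rem.length := by
  induction fuel with
  | zero =>
    intro rem hle t ht
    match rem, hle with
    | [], _ => simp [pvPermsB] at ht; simp [ht]
  | succ f ih =>
    intro rem hle t ht
    match rem with
    | [] => simp [pvPermsB] at ht; simp [ht]
    | r :: rs =>
      rw [show pvPermsB (f + 1) (r :: rs)
            = (PySem.List.sorted (PySem.Set.ofList (r :: rs)) (fun x => x) false).foldl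
                (fun out v => out ++ (pvPermsB f ((PySem.List.remove? (r :: rs) v).getD (r :: rs))).map
                  (fun t => v :: t)) [] from by rw [pvPermsB]; simp] at ht
      rw [PySem.List.foldl_append_eq_flatMap] at ht
      simp only [List.nil_append, List.mem_flatMap, List.mem_map] at ht
      obtain ⟨v, hv, t', ht', rfl⟩ := ht
      have hvrem : v ∈ r :: rs := by
        rw [PySem.List.mem_sorted] at hv
        exact (PySem.Set.mem_ofList _ _).mp hv
      rw [PySem.List.remove?_eq_some_erase _ v hvrem] at ht'
      simp only [Option.getD_some] at ht'
      have hlen : ((r :: rs).erase v).length = rs.length := by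
        simp [List.length_erase_of_mem hvrem]
      have h1 := ih ((r :: rs).erase v) (by rw [hlen]; simpa using hle) t' ht'
      simp [h1, hlen]

-- shifting A's index loop under a cons of the state
theorem fill_shift (p : List Int) (bs : List Bool) (b : Bool) (l : List Nat) :
    ∀ (h : Int) (t : List Int) (k : Nat),
    ((l.map (· + 1)).foldl
      (fun (st : List Int × Nat) i =>
        if !((b :: bs).getD i false) then (st.1.set i (p.getD st.2 0), st.2 + 1) else st)
      (h :: t, k))
    = (fun (r : List Int × Nat) => (h :: r.1, r.2))
        (l.foldl
          (fun (st : List Int × Nat) i =>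
            if !(bs.getD i false) then (st.1.set i (p.getD st.2 0), st.2 + 1) else st)
          (t, k)) := by
  induction l with
  | nil => intro h t k; simp
  | cons i l ih =>
    intro h t k
    simp only [List.map_cons, List.foldl_cons, List.getD_cons_succ, List.set_cons_succ]
    by_cases hb : bs.getD i false
    · rw [if_neg (by simpa using hb), if_neg (by simpa using hb)]; exact ih h t k
    · rw [if_pos (by simpa using hb), if_pos (by simpa using hb)]
      exact ih h (t.set i (p.getD k 0)) (k + 1)

-- the two fill loops agree when the path has one value per non-blocked slot
theorem fill_eq (xs : List Int) : ∀ (bs : List Bool) (p : List Int) (k : Nat),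
    xs.length ≤ bs.length →
    p.length = k + ((xs.zip bs).filterMap (fun vb => if vb.2 then none else some vb.1)).length →
    ((List.range xs.length).foldl
      (fun (st : List Int × Nat) i =>
        if !(bs.getD i false) then (st.1.set i (p.getD st.2 0), st.2 + 1) else st)
      (xs, k)).1 = pvFillB (xs.zip bs) (p.drop k) := by
  induction xs with
  | nil => intro bs p k _ _; simp [pvFillB]
  | cons x xs ih =>
    intro bs p k hle hp
    cases bs with
    | nil => simp at hle
    | cons b bs =>
      have hmap : List.map Nat.succ (List.range xs.length) = (List.range xs.length).map (· + 1) := rfl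
      rw [List.length_cons, List.range_succ_eq_map, List.foldl_cons, hmap]
      simp only [List.getD_cons_zero, List.set_cons_zero]
      rw [List.zip_cons_cons] at hp ⊢
      cases b with
      | true =>
        rw [if_neg (by simp)]
        rw [fill_shift]
        have hR : pvFillB ((x, true) :: xs.zip bs) (p.drop k)
            = x :: pvFillB (xs.zip bs) (p.drop k) := by simp [pvFillB]
        rw [hR]
        dsimp only
        simp only [List.filterMap_cons] at hp
        exact congrArg (List.cons x) (ih bs p k (by simpa using hle) (by simpa using hp))
      | false =>
        rw [if_pos (by simp)]
        rw [fill_shift]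
        dsimp only
        simp only [List.filterMap_cons] at hp
        have hk : k < p.length := by simp at hp; omega
        have hR : pvFillB ((x, false) :: xs.zip bs) (p.drop k)
            = p[k] :: pvFillB (xs.zip bs) (p.drop (k + 1)) := by
          rw [List.drop_eq_getElem_cons hk]; simp [pvFillB]
        rw [hR, List.getD_eq_getElem _ _ hk]
        exact congrArg _ (ih bs p (k + 1) (by simpa using hle) (by simp at hp ⊢; omega))

-- A's index comprehension for free equals B's zip comprehension
theorem free_eq (xs : List Int) : ∀ (bs : List Bool), xs.length ≤ bs.length →
    (List.range xs.length).filterMap (fun i => if bs.getD i false then none else some (xs.getD i 0))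
      = (xs.zip bs).filterMap (fun vb => if vb.2 then none else some vb.1) := by
  induction xs with
  | nil => intro bs _; simp
  | cons x xs ih =>
    intro bs hle
    cases bs with
    | nil => simp at hle
    | cons b bs =>
      rw [List.length_cons, List.range_succ_eq_map, List.filterMap_cons, List.filterMap_map]
      simp only [List.getD_cons_zero]
      have hcomp : ((fun i => if (b :: bs).getD i false then none
            else some ((x :: xs).getD i 0)) ∘ Nat.succ)
          = (fun i => if bs.getD i false then none else some (xs.getD i 0)) := by
        funext i; simp [Function.comp]
      rw [hcomp, ih bs (by simpa using hle)]
      cases b <;> simp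

-- ===== VERDICT (by name: the statement is the Claim_ definition above) =====
theorem permuteWithBlocked_spec : Claim_equal_permuteWithBlocked := by
  intro nums blocked _ hpre
  show permuteWithBlocked nums blocked = permuteWithBlocked_alt nums blocked
  unfold permuteWithBlocked permuteWithBlocked_alt
  dsimp only
  rw [free_eq nums blocked hpre]
  set F := PySem.List.sorted
    ((nums.zip blocked).filterMap (fun vb => if vb.2 then none else some vb.1))
    (fun x => x) false with hF
  have hlenF : F.length
      = ((nums.zip blocked).filterMap (fun vb => if vb.2 then none else some vb.1)).length :=
    PySem.List.length_sorted _ _ _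
  have hinv : pvInv F (List.replicate F.length false) := by
    intro i h1 _ h3
    rw [List.getD_replicate _ (by omega : i + 1 < (PySem.List.sorted ((nums.zip blocked).filterMap (fun vb => if vb.2 then none else some vb.1)) (fun x => x) false).length)] at h3
    exact absurd h3 (by simp)
  have hrep := pvRem_replicate F
  have h := bt_eq F.length F nums blocked nums.length (List.replicate F.length false) [] F.length
    (PySem.List.sorted_pairwise _ _) (by simp) hinv (by rw [hrep]; simp) (by rw [hrep])
    (by rw [hrep])
  rw [h, hrep]
  apply List.map_congr_left
  intro t ht
  have htlen : t.length = F.length := pvPermsB_length F.length F (le_refl _) t ht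
  have hfill := fill_eq nums blocked t 0 hpre (by rw [htlen, hlenF]; omega)
  show pvFillA blocked ([] ++ t) nums.length nums = pvFillB (nums.zip blocked) t
  rw [List.nil_append]
  unfold pvFillA
  simpa using hfill
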